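/- GENERATED by farm/mkstatement.py from design/units.tsv (unit `compute_sorted_huffman.1`) and the assertions of Vorbis/Spec/Codebook/SortedHuffman.lean — do not edit.
   THE STATEMENT of the proof unit `compute_sorted_huffman.1`: segment 1 of `compute_sorted_huffman` (78 instructions; entries 0x10b1e0;
   exits 0x10b324; ranges 0x10b1e0-0x10b322)
   takes each of its entry assertions to one of its exit assertions (`Vorbis.Spec.SortedHuffman.Claim1`), given the contracts of its callees.
   What the names mean: Vorbis/Spec/Basic.lean (the shared hypotheses), Vorbis/Spec/Codebook/SortedHuffman.lean (the assertions). The theorem to prove: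
   `theorem compute_sorted_huffman_1_ok : Vorbis.Spec.compute_sorted_huffman_1.Statement`. -/
import Vorbis.Spec.Codebook.SortedHuffman
import Vorbis.Spec.Leaves2
namespace Vorbis.Spec.compute_sorted_huffman_1
open X86 X86.User Asan

/-- The statement of unit `compute_sorted_huffman.1`. -/
def Statement : Prop :=
  ∀ (Lay : Layout) (_hLay : Lay.hi = 0x1000000) (μ : Microarch) (_hμ : UserX.MicroOK μ) (u₀ : State)
    (_hcode : HasCodeNat Lay u₀ Vorbis.L.compute_sorted_huffman.entry Vorbis.Code.code_compute_sorted_huffman.nat Vorbis.L.compute_sorted_huffman.size)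
    (_h_asan_load1_noabort : Asan.SmallCheck Lay μ Vorbis.WayInv (Vorbis.CodeOK u₀) [.rax, .rdx] 1 Vorbis.L.__asan_load1_noabort.entry)
    (_h_asan_load4_noabort : Asan.SmallCheck Lay μ Vorbis.WayInv (Vorbis.CodeOK u₀) [.rax, .rcx, .rdx] 4 Vorbis.L.__asan_load4_noabort.entry)
    (_h_include_in_sort : ∀ (others : List Obj) (frames : List (Nat × FrameLayout)), Calls Lay μ Vorbis.WayInv (Vorbis.conv u₀) Vorbis.L.include_in_sort.entry (Vorbis.Spec.include_in_sort.spec others frames))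
    (_h_asan_load8_noabort : Asan.SmallCheck Lay μ Vorbis.WayInv (Vorbis.CodeOK u₀) [.rax, .rcx, .rdx] 8 Vorbis.L.__asan_load8_noabort.entry)
    (_h_bit_reverse : ∀ (others : List Obj) (frames : List (Nat × FrameLayout)), Calls Lay μ Vorbis.WayInv (Vorbis.conv u₀) Vorbis.L.bit_reverse.entry (Vorbis.Spec.bit_reverse.spec others frames))
    (_h_asan_store4_noabort : Asan.SmallCheck Lay μ Vorbis.WayInv (Vorbis.CodeOK u₀) [.rax, .rcx, .rdx] 4 Vorbis.L.__asan_store4_noabort.entry),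
    Vorbis.Spec.SortedHuffman.Claim1 Lay μ u₀

end Vorbis.Spec.compute_sorted_huffman_1
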